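-- pv_equiv track=rewrite | github.com/vardhan2004/codemind-python | Count_sorted_columns_in_a_matrix.py | cnt_col_sort
-- ===== SOURCE A (Python) =====
-- def cnt_col_sort(M, n, m):
--     flag = True
--     cnt = 0
--     for i in range(m):
--         ref = M[0][i]
--         for j in range(1, n):
--             if M[j][i] < ref:
--                 flag = False
--             else:
--                 ref = M[j][i]
--         if flag:
--             cnt += 1
--         else:
--             flag = True
--     return cnt
-- ===== SOURCE B (Python) =====
-- def cnt_col_sort(M, n, m):
--     state = [(M[0][i], True) for i in range(m)]
--     if state:
--         for j in range(1, n):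
--             state = [(r, False) if M[j][i] < r else (M[j][i], ok)
--                      for i, (r, ok) in enumerate(state)]
--     return sum(ok for _, ok in state)
-- ===== Notes on version B (the rewrite author's own statement) =====
-- stated objective: alternative
-- what changed: B interchanges the loop nesting: instead of scanning each column top-to-bottom with a scalar (flag, ref), it sweeps the matrix one row at a time, rebuilding a per-column list of (running-ref, still-sorted) pairs functionally and summing the flags at the end.
import Mathlib
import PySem

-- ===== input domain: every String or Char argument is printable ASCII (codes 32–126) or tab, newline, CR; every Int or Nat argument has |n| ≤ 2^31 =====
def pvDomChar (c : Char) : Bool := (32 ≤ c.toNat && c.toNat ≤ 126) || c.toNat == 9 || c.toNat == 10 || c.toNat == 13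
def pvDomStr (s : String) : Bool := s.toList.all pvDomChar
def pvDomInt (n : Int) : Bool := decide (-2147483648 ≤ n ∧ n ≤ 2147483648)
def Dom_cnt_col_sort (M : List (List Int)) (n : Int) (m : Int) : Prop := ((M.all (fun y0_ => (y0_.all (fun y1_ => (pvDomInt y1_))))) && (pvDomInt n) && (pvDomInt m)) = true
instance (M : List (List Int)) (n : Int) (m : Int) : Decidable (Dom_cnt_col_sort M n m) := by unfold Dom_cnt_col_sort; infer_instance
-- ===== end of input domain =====

-- B interchanges the loops to a row-major functional sweep over per-column (ref, ok) pairs; objective: alternative decomposition, same cost.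

-- ===== PORT A =====
-- A's inner-loop body for column i at row index j (state = (flag, ref)).
def colStep (M : List (List Int)) (i : Int) (p : Bool × Int) (j : Int) : Bool × Int :=
  if PySem.List.pyGetD (PySem.List.pyGetD M j []) i 0 < p.2 then (false, p.2)
  else (p.1, PySem.List.pyGetD (PySem.List.pyGetD M j []) i 0)

-- A's outer-loop body for column i (state = (flag, cnt)).
def aOuter (M : List (List Int)) (n : Int) (st : Bool × Int) (i : Int) : Bool × Int :=
  let r := (PySem.List.pyRange 1 n 1).foldl (colStep M i)
             (st.1, PySem.List.pyGetD (PySem.List.pyGetD M 0 []) i 0)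
  if r.1 then (true, st.2 + 1) else (true, st.2)

def cnt_col_sort (M : List (List Int)) (n : Int) (m : Int) : Int :=
  ((PySem.List.pyRange 0 m 1).foldl (aOuter M n) (true, 0)).2

-- ===== PORT B =====
-- one row of B's sweep: rebuild the whole (ref, ok) state list from row j
def bRow (M : List (List Int)) (j : Int) (st : List (Int × Bool)) : List (Int × Bool) :=
  (PySem.List.enumerate st).map (fun p =>
     if PySem.List.pyGetD (PySem.List.pyGetD M j []) p.1 0 < p.2.1 then (p.2.1, false)
     else (PySem.List.pyGetD (PySem.List.pyGetD M j []) p.1 0, p.2.2))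

def cnt_col_sort_alt (M : List (List Int)) (n : Int) (m : Int) : Int :=
  ((if ((PySem.List.pyRange 0 m 1).map
          (fun i => (PySem.List.pyGetD (PySem.List.pyGetD M 0 []) i 0, true))).isEmpty then
      ((PySem.List.pyRange 0 m 1).map
        (fun i => (PySem.List.pyGetD (PySem.List.pyGetD M 0 []) i 0, true)))
    else
      (PySem.List.pyRange 1 n 1).foldl (fun st j => bRow M j st)
        ((PySem.List.pyRange 0 m 1).map
          (fun i => (PySem.List.pyGetD (PySem.List.pyGetD M 0 []) i 0, true)))).foldl
    (fun acc p => acc + (if p.2 then (1 : Int) else 0)) 0)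

-- ===== PRECONDITION & SPEC =====
-- Pre_ excludes exactly the inputs where A raises IndexError (m > 0 with too few rows,
-- or an accessed row shorter than m); it admits every input on which A returns.
def Pre_cnt_col_sort (M : List (List Int)) (n : Int) (m : Int) : Prop :=
  0 < m → ((max n 1) ≤ (M.length : Int) ∧ ∀ r ∈ M.take (max n 1).toNat, m ≤ (r.length : Int))
instance (M : List (List Int)) (n : Int) (m : Int) : Decidable (Pre_cnt_col_sort M n m) := by
  unfold Pre_cnt_col_sort; infer_instance

def pvWitness_cnt_col_sort : List (List Int) × Int × Int := ([[1, 2], [3, 1]], 2, 2)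

def Spec_cnt_col_sort (M : List (List Int)) (n : Int) (m : Int) (out : Int) : Prop := out = cnt_col_sort_alt M n m
instance (M : List (List Int)) (n : Int) (m : Int) (out : Int) : Decidable (Spec_cnt_col_sort M n m out) := by unfold Spec_cnt_col_sort; infer_instance

-- ===== CLAIM (what is proved, stated in full; the proofs are below) =====
def Claim_equal_cnt_col_sort : Prop := ∀ (M : List (List Int)) (n : Int) (m : Int), Dom_cnt_col_sort M n m → Pre_cnt_col_sort M n m → Spec_cnt_col_sort M n m (cnt_col_sort M n m)

-- ===== LEMMAS AND PROOFS =====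

-- per-column scalar state after the full row scan
def colState (M : List (List Int)) (n : Int) (i : Int) : Bool × Int :=
  (PySem.List.pyRange 1 n 1).foldl (colStep M i)
    (true, PySem.List.pyGetD (PySem.List.pyGetD M 0 []) i 0)

-- B's per-column step (state = (ref, ok)), the swap of colStep
def bStep (M : List (List Int)) (j : Int) (i : Int) (p : Int × Bool) : Int × Bool :=
  if PySem.List.pyGetD (PySem.List.pyGetD M j []) i 0 < p.1 then (p.1, false)
  else (PySem.List.pyGetD (PySem.List.pyGetD M j []) i 0, p.2)

lemma bStep_swap (M : List (List Int)) (j i : Int) (p : Int × Bool) :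
    bStep M j i p = Prod.swap (colStep M i p.swap j) := by
  obtain ⟨a, b⟩ := p
  simp [bStep, colStep]
  split <;> simp

lemma foldl_bStep_swap (M : List (List Int)) (i : Int) :
    ∀ (L : List Int) (p : Int × Bool),
      L.foldl (fun q j => bStep M j i q) p = Prod.swap (L.foldl (colStep M i) p.swap) := by
  intro L
  induction L with
  | nil => intro p; simp
  | cons j t ih =>
      intro p
      simp only [List.foldl_cons]
      rw [bStep_swap, ih, Prod.swap_swap]

lemma enum_map_pyRange {γ : Type} (f : Int → γ) :
    ∀ (k : Nat) (s : Int),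
      PySem.List.enumerate ((PySem.List.pyRange s (s + k) 1).map f) s
        = (PySem.List.pyRange s (s + k) 1).map (fun i => (i, f i)) := by
  intro k
  induction k with
  | zero => intro s; simp [PySem.List.pyRange_one_eq_nil]
  | succ k ih =>
      intro s
      rw [PySem.List.pyRange_one_cons (by omega : s < s + (k + 1 : Nat))]
      have h : s + 1 + (k : Int) = s + (k + 1 : Nat) := by push_cast; ring
      simp only [List.map_cons, PySem.List.enumerate_cons]
      rw [← h, ih (s + 1)]

lemma bRow_map (M : List (List Int)) (j m : Int) (f : Int → Int × Bool) :
    bRow M j ((PySem.List.pyRange 0 m 1).map f)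
      = (PySem.List.pyRange 0 m 1).map (fun i => bStep M j i (f i)) := by
  by_cases hm : m ≤ 0
  · simp [bRow, PySem.List.pyRange_one_eq_nil hm]
  · push Not at hm
    have h0 : (0 : Int) + (m.toNat : Int) = m := by omega
    unfold bRow
    rw [show (PySem.List.pyRange 0 m 1) = PySem.List.pyRange 0 (0 + (m.toNat : Int)) 1 by rw [h0]]
    rw [enum_map_pyRange f m.toNat 0]
    rw [List.map_map]
    rfl

lemma foldl_bRow (M : List (List Int)) (m : Int) :
    ∀ (L : List Int) (f : Int → Int × Bool),
      L.foldl (fun st j => bRow M j st) ((PySem.List.pyRange 0 m 1).map f)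
        = (PySem.List.pyRange 0 m 1).map
            (fun i => L.foldl (fun p j => bStep M j i p) (f i)) := by
  intro L
  induction L with
  | nil => intro f; simp
  | cons j t ih =>
      intro f
      simp only [List.foldl_cons, bRow_map]
      exact ih (fun i => bStep M j i (f i))

lemma foldl_count {γ : Type} (g : γ → Bool) :
    ∀ (l : List γ) (c : Int),
      l.foldl (fun acc p => acc + (if g p then (1 : Int) else 0)) c
        = c + (l.map (fun p => if g p then (1 : Int) else 0)).sum := by
  intro l
  induction l with
  | nil => intro c; simp
  | cons x t ih => intro c; simp [ih]; ring

lemma foldl_aOuter (M : List (List Int)) (n : Int) :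
    ∀ (L : List Int) (c : Int),
      L.foldl (aOuter M n) (true, c)
        = (true, c + (L.map (fun i => if (colState M n i).1 then (1 : Int) else 0)).sum) := by
  intro L
  induction L with
  | nil => intro c; simp
  | cons i t ih =>
      intro c
      have hstep : aOuter M n (true, c) i
          = (true, c + (if (colState M n i).1 then (1 : Int) else 0)) := by
        simp only [aOuter, colState]
        split <;> simp_all
      rw [List.foldl_cons, hstep, ih]
      simp [List.map_cons, List.sum_cons]
      ring

lemma alt_eq (M : List (List Int)) (n m : Int) :
    cnt_col_sort_alt M n m
      = ((PySem.List.pyRange 0 m 1).map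
          (fun i => if (colState M n i).1 then (1 : Int) else 0)).sum := by
  unfold cnt_col_sort_alt
  split
  · next hemp =>
      simp only [List.isEmpty_iff, List.map_eq_nil_iff] at hemp
      simp [hemp]
  rw [foldl_bRow M m (PySem.List.pyRange 1 n 1)
        (fun i => (PySem.List.pyGetD (PySem.List.pyGetD M 0 []) i 0, true))]
  rw [foldl_count (fun p : Int × Bool => p.2)]
  simp only [List.map_map, zero_add]
  congr 1
  apply List.map_congr_left
  intro i _
  simp only [Function.comp, foldl_bStep_swap]
  simp [colState, Prod.swap]

-- ===== VERDICT (by name: the statement is the Claim_ definition above) =====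
theorem cnt_col_sort_spec : Claim_equal_cnt_col_sort := by
  intro M n m _ _
  unfold Spec_cnt_col_sort
  rw [alt_eq]
  unfold cnt_col_sort
  rw [foldl_aOuter]
  simp
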